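-- pv_equiv track=rewrite | github.com/poassyhin/disciplima_nn | task2/task2.py | analyze_graph
-- ===== SOURCE A (Python) =====
-- def analyze_graph(matrix, nodes):
--     analysis_matrix = [[0 for _ in range(5)] for _ in nodes]
--
--     for i, row in enumerate(matrix):
--         for j, value in enumerate(row):
--             if value == 1:
--                 analysis_matrix[i][0] += 1
--                 analysis_matrix[i][2] += sum(1 for v in matrix[j] if v == 1)
--             elif value == -1:
--                 analysis_matrix[i][1] += 1
--                 analysis_matrix[i][3] += sum(1 for v in matrix[j] if v == -1)
--                 analysis_matrix[i][4] += sum(1 for k, v in enumerate(matrix[j]) if v == 1 and k != i)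
--
--     return analysis_matrix
-- ===== SOURCE B (Python) =====
-- def analyze_graph(matrix, nodes):
--     pos = [sum(1 for v in row if v == 1) for row in matrix]
--     neg = [sum(1 for v in row if v == -1) for row in matrix]
--     result = []
--     for i in range(len(nodes)):
--         r = [0, 0, 0, 0, 0]
--         if i < len(matrix):
--             for j, v in enumerate(matrix[i]):
--                 if v == 1:
--                     r[0] += 1
--                     r[2] += pos[j]
--                 elif v == -1:
--                     r[1] += 1
--                     r[3] += neg[j]
--                     r[4] += pos[j] - (1 if i < len(matrix[j]) and matrix[j][i] == 1 else 0)
--         result.append(r)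
--     return result
-- ===== Notes on version B (the rewrite author's own statement) =====
-- stated objective: alternative
-- what changed: Precomputes per-row +1/-1 counts once and builds each output row in one pass over its matrix row using those counts (col 4 via pos[j] minus an O(1) check of matrix[j][i]), instead of rescanning matrix[j] for every +1/-1 edge; intended as faster (O(n^2) vs O(n^3) work on the +1/-1 edges), but on the random timing inputs the measured ratio hovers around the 1.5x threshold, so no speed is claimed.
import Mathlib
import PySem

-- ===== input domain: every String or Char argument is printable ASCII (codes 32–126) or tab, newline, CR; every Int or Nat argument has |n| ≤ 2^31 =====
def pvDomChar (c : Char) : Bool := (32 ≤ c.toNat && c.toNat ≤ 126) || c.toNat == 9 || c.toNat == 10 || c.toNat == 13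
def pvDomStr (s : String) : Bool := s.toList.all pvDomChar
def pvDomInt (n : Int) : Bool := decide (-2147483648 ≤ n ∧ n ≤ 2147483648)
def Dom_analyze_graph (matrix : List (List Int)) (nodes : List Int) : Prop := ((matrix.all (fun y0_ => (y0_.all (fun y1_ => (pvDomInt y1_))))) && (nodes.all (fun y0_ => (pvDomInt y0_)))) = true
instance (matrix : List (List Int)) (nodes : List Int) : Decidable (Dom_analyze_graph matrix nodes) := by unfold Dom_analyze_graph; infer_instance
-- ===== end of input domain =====

-- B replaces A's per-edge rescans of matrix[j] by per-row +1/-1 counts computed once (alternative one-pass-per-row algorithm).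

-- ===== PORT A =====
-- analysis_matrix[i][c] += d  (reads row i, updates column c, writes back; Python-exact via pySetD/pyGetD)
def pvBump (am : List (List Int)) (i c d : Int) : List (List Int) :=
  PySem.List.pySetD am i
    (PySem.List.pySetD (PySem.List.pyGetD am i []) c
      (PySem.List.pyGetD (PySem.List.pyGetD am i []) c 0 + d))

-- sum(1 for v in l if v == w)
def pvCnt (l : List Int) (w : Int) : Int :=
  l.foldl (fun a x => if x = w then a + 1 else a) 0

-- sum(1 for k, v in enumerate(l) if v == 1 and k != i)
def pvCntNe (l : List Int) (i : Int) : Int :=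
  (PySem.List.enumerate l 0).foldl (fun a kv => if kv.2 = 1 ∧ kv.1 ≠ i then a + 1 else a) 0

-- body of A's inner loop for row index i and pair (j, value)
def pvStepA (matrix : List (List Int)) (i : Int) (am : List (List Int)) (jv : Int × Int) : List (List Int) :=
  if jv.2 = 1 then
    pvBump (pvBump am i 0 1) i 2 (pvCnt (PySem.List.pyGetD matrix jv.1 []) 1)
  else if jv.2 = -1 then
    pvBump (pvBump (pvBump am i 1 1) i 3 (pvCnt (PySem.List.pyGetD matrix jv.1 []) (-1)))
      i 4 (pvCntNe (PySem.List.pyGetD matrix jv.1 []) i)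
  else am

def analyze_graph (matrix : List (List Int)) (nodes : List Int) : List (List Int) :=
  (PySem.List.enumerate matrix 0).foldl
    (fun am ir => (PySem.List.enumerate ir.2 0).foldl (pvStepA matrix ir.1) am)
    (nodes.map (fun _ => (List.range 5).map (fun _ => (0 : Int))))

-- ===== PORT B =====
-- body of B's inner loop: r is the 5-tuple state, jv the enumerate pair (j, v)
def pvStepB (matrix : List (List Int)) (pos neg : List Int) (i : Nat)
    (r : Int × Int × Int × Int × Int) (jv : Int × Int) : Int × Int × Int × Int × Int :=
  if jv.2 = 1 then
    (r.1 + 1, r.2.1, r.2.2.1 + PySem.List.pyGetD pos jv.1 0, r.2.2.2.1, r.2.2.2.2)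
  else if jv.2 = -1 then
    (r.1, r.2.1 + 1, r.2.2.1, r.2.2.2.1 + PySem.List.pyGetD neg jv.1 0,
      r.2.2.2.2 + PySem.List.pyGetD pos jv.1 0 -
        (if (i : Int) < (PySem.List.pyGetD matrix jv.1 []).length ∧
            PySem.List.pyGetD (PySem.List.pyGetD matrix jv.1 []) (i : Int) 0 = 1 then 1 else 0))
  else r

def analyze_graph_alt (matrix : List (List Int)) (nodes : List Int) : List (List Int) :=
  let pos := matrix.map (fun row => row.foldl (fun a v => if v = 1 then a + 1 else a) (0 : Int))
  let neg := matrix.map (fun row => row.foldl (fun a v => if v = -1 then a + 1 else a) (0 : Int))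
  (List.range nodes.length).map (fun i =>
    if i < matrix.length then
      let t := (PySem.List.enumerate (matrix.getD i []) 0).foldl (pvStepB matrix pos neg i) (0, 0, 0, 0, 0)
      [t.1, t.2.1, t.2.2.1, t.2.2.2.1, t.2.2.2.2]
    else [0, 0, 0, 0, 0])

-- ===== PRECONDITION & SPEC =====
-- Pre_ excludes exactly the inputs on which Python A raises IndexError: a ±1 entry at
-- (i, j) with i ≥ len(nodes) (write to analysis_matrix[i]) or j ≥ len(matrix) (read of matrix[j]).
def Pre_analyze_graph (matrix : List (List Int)) (nodes : List Int) : Prop :=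
  ∀ i, i < matrix.length → ∀ j, j < (matrix.getD i []).length →
    ((matrix.getD i []).getD j 0 = 1 ∨ (matrix.getD i []).getD j 0 = -1) →
      i < nodes.length ∧ j < matrix.length

instance (matrix : List (List Int)) (nodes : List Int) : Decidable (Pre_analyze_graph matrix nodes) := by
  unfold Pre_analyze_graph; infer_instance

def pvWitness_analyze_graph : List (List Int) × List Int := ([[1, -1], [0, 1]], [5, 7])

def Spec_analyze_graph (matrix : List (List Int)) (nodes : List Int) (out : List (List Int)) : Prop := out = analyze_graph_alt matrix nodes
instance (matrix : List (List Int)) (nodes : List Int) (out : List (List Int)) : Decidable (Spec_analyze_graph matrix nodes out) := by unfold Spec_analyze_graph; infer_instance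

-- ===== CLAIM (what is proved, stated in full; the proofs are below) =====
def Claim_equal_analyze_graph : Prop := ∀ (matrix : List (List Int)) (nodes : List Int), Dom_analyze_graph matrix nodes → Pre_analyze_graph matrix nodes → Spec_analyze_graph matrix nodes (analyze_graph matrix nodes)

-- ===== LEMMAS AND PROOFS =====

-- per-row 5-tuple of increments that A accumulates for a row scanned from offset s, at row index i
def pvRowT (matrix : List (List Int)) (i : Int) : Nat → List Int → Int × Int × Int × Int × Int
  | _, [] => (0, 0, 0, 0, 0)
  | s, v :: rest =>
    let t := pvRowT matrix i (s + 1) rest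
    if v = 1 then
      (t.1 + 1, t.2.1, t.2.2.1 + pvCnt (PySem.List.pyGetD matrix (s : Int) []) 1, t.2.2.2.1, t.2.2.2.2)
    else if v = -1 then
      (t.1, t.2.1 + 1, t.2.2.1, t.2.2.2.1 + pvCnt (PySem.List.pyGetD matrix (s : Int) []) (-1),
        t.2.2.2.2 + pvCntNe (PySem.List.pyGetD matrix (s : Int) []) i)
    else t

def pvAdd5 (r : List Int) (t : Int × Int × Int × Int × Int) : List Int :=
  [r.getD 0 0 + t.1, r.getD 1 0 + t.2.1, r.getD 2 0 + t.2.2.1,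
   r.getD 3 0 + t.2.2.2.1, r.getD 4 0 + t.2.2.2.2]

theorem pv_set_self (am : List (List Int)) (m : Nat) (r : List Int) (h : am[m]? = some r) :
    am.set m r = am := by
  apply List.ext_getElem?
  intro n
  by_cases hn : n = m
  · subst hn
    simp [List.getElem?_set_self', h]
  · simp [List.getElem?_set_ne (by omega : m ≠ n)]

theorem pv_bump_eq (am : List (List Int)) (m : Nat) (r : List Int) (h : am[m]? = some r)
    (c d : Int) :
    pvBump am (m : Int) c d =
      am.set m (PySem.List.pySetD r c (PySem.List.pyGetD r c 0 + d)) := by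
  have hget : PySem.List.pyGetD am (m : Int) [] = r := by
    simp [PySem.List.pyGetD_natCast, List.getD_eq_getElem?_getD, h]
  simp [pvBump, hget, PySem.List.pySetD_natCast]

theorem pv_getElem?_set_self (am : List (List Int)) (m : Nat) (r : List Int)
    (h : am[m]? = some r) (x : List Int) : (am.set m x)[m]? = some x := by
  have : m < am.length := (List.getElem?_eq_some_iff.1 h).1
  simp [this]

theorem pv_innerA_none (matrix : List (List Int)) (m : Nat)
    (row : List Int) : ∀ (s : Int) (am : List (List Int)), am[m]? = none →
    (PySem.List.enumerate row s).foldl (pvStepA matrix (m : Int)) am = am := by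
  induction row with
  | nil => intro s am _; simp [PySem.List.enumerate_nil]
  | cons v rest ih =>
    intro s am h
    have hlen : am.length ≤ m := by
      by_contra hc
      exact absurd h (by simp; omega)
    have hset : ∀ x : List Int, am.set m x = am := fun x => List.set_eq_of_length_le hlen
    have hbump : ∀ c d : Int, pvBump am (m : Int) c d = am := by
      intro c d
      simp [pvBump, PySem.List.pySetD_natCast, hset]
    rw [PySem.List.enumerate_cons]
    simp only [List.foldl_cons]
    have hstep : pvStepA matrix (m : Int) am (s, v) = am := by
      simp [pvStepA, hbump]
    rw [hstep]
    exact ih (s + 1) am h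

theorem pvAdd5_cons (a b c d e : Int) (t : Int × Int × Int × Int × Int) :
    pvAdd5 [a, b, c, d, e] t =
      [a + t.1, b + t.2.1, c + t.2.2.1, d + t.2.2.2.1, e + t.2.2.2.2] := by
  simp [pvAdd5, List.getD]

theorem pv_innerA (matrix : List (List Int)) (m : Nat) :
    ∀ (row : List Int) (s : Nat) (am : List (List Int)) (a b c d e : Int),
    am[m]? = some [a, b, c, d, e] →
    (PySem.List.enumerate row (s : Int)).foldl (pvStepA matrix (m : Int)) am =
      am.set m (pvAdd5 [a, b, c, d, e] (pvRowT matrix (m : Int) s row)) := by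
  intro row
  induction row with
  | nil =>
    intro s am a b c d e h
    simp [PySem.List.enumerate_nil, pvRowT, pvAdd5, pv_set_self am m _ h]
  | cons v rest ih =>
    intro s am a b c d e h
    rw [PySem.List.enumerate_cons]
    simp only [List.foldl_cons]
    have hcast : ((s : Int) + 1) = ((s + 1 : Nat) : Int) := by push_cast; ring
    by_cases h1 : v = 1
    · subst h1
      have e1 : pvStepA matrix (m : Int) am ((s : Int), 1) =
          am.set m [a + 1, b, c + pvCnt (PySem.List.pyGetD matrix (s : Int) []) 1, d, e] := by
        rw [pvStepA]
        norm_num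
        rw [pv_bump_eq am m _ h]
        rw [pv_bump_eq _ m _ (pv_getElem?_set_self am m _ h _)]
        rw [List.set_set]
        simp [PySem.List.pySetD, PySem.List.pySet?, PySem.List.pyGetD, PySem.List.pyGet?,
          PySem.List.pyIdx?]
      rw [e1, hcast,
        ih (s + 1) _ (a + 1) b (c + pvCnt (PySem.List.pyGetD matrix (s : Int) []) 1) d e
          (pv_getElem?_set_self am m _ h _)]
      rw [List.set_set, pvAdd5_cons, pvAdd5_cons]
      show _ = am.set m _
      rw [pvRowT]
      norm_num
      congr 1
      simp only [List.cons.injEq, and_true]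
      and_intros <;> first | trivial | ring
    · by_cases h2 : v = -1
      · subst h2
        have e1 : pvStepA matrix (m : Int) am ((s : Int), -1) =
            am.set m [a, b + 1, c, d + pvCnt (PySem.List.pyGetD matrix (s : Int) []) (-1),
              e + pvCntNe (PySem.List.pyGetD matrix (s : Int) []) (m : Int)] := by
          rw [pvStepA]
          norm_num
          rw [pv_bump_eq am m _ h]
          rw [pv_bump_eq _ m _ (pv_getElem?_set_self am m _ h _)]
          rw [List.set_set]
          rw [pv_bump_eq _ m _ (pv_getElem?_set_self am m _ h _)]
          rw [List.set_set]
          simp [PySem.List.pySetD, PySem.List.pySet?, PySem.List.pyGetD, PySem.List.pyGet?,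
            PySem.List.pyIdx?]
        rw [e1, hcast,
          ih (s + 1) _ a (b + 1) c (d + pvCnt (PySem.List.pyGetD matrix (s : Int) []) (-1))
            (e + pvCntNe (PySem.List.pyGetD matrix (s : Int) []) (m : Int))
            (pv_getElem?_set_self am m _ h _)]
        rw [List.set_set, pvAdd5_cons, pvAdd5_cons]
        show _ = am.set m _
        rw [pvRowT]
        norm_num
        congr 1
        simp only [List.cons.injEq, and_true]
        and_intros <;> first | trivial | ring
      · have e1 : pvStepA matrix (m : Int) am ((s : Int), v) = am := by
          rw [pvStepA]; simp [h1, h2]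
        rw [e1, hcast, ih (s + 1) _ a b c d e h]
        show _ = am.set m _
        rw [pvRowT]
        simp only [h1, h2, if_false]

theorem pv_inv_set (am : List (List Int)) (m : Nat) (x : List Int)
    (hx : ∃ a b c d e : Int, x = [a, b, c, d, e])
    (hinv : ∀ r ∈ am, ∃ a b c d e : Int, r = [a, b, c, d, e]) :
    ∀ r ∈ am.set m x, ∃ a b c d e : Int, r = [a, b, c, d, e] := by
  intro r hr
  rcases List.mem_or_eq_of_mem_set hr with h | h
  · exact hinv r h
  · exact h ▸ hx

theorem pv_outerA (matrix : List (List Int)) :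
    ∀ (ms : List (List Int)) (s : Nat) (am : List (List Int)),
    (∀ r ∈ am, ∃ a b c d e : Int, r = [a, b, c, d, e]) →
    ∀ n : Nat,
    ((PySem.List.enumerate ms (s : Int)).foldl
        (fun am ir => (PySem.List.enumerate ir.2 0).foldl (pvStepA matrix ir.1) am) am)[n]? =
      if s ≤ n ∧ n - s < ms.length then
        (am[n]?).map (fun r => pvAdd5 r (pvRowT matrix (n : Int) 0 (ms.getD (n - s) [])))
      else am[n]? := by
  intro ms
  induction ms with
  | nil =>
    intro s am _ n
    simp [PySem.List.enumerate_nil]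
  | cons row rest ih =>
    intro s am hinv n
    rw [PySem.List.enumerate_cons]
    simp only [List.foldl_cons]
    have hcast : ((s : Int) + 1) = ((s + 1 : Nat) : Int) := by push_cast; ring
    have hz : (0 : Int) = ((0 : Nat) : Int) := by norm_num
    rcases ham : am[s]? with _ | r
    · -- row index s out of range of am: inner fold is a no-op
      have hno : (PySem.List.enumerate row (0 : Int)).foldl (pvStepA matrix (s : Int)) am = am :=
        pv_innerA_none matrix s row 0 am ham
      rw [hno, hcast, ih (s + 1) am hinv n]
      have hlen : am.length ≤ s := by
        by_contra hc
        exact absurd ham (by simp; omega)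
      by_cases hn : n < am.length
      · have c1 : ¬ (s + 1 ≤ n ∧ n - (s + 1) < rest.length) := by omega
        have c2 : ¬ (s ≤ n ∧ n - s < (row :: rest).length) := by simp only [List.length_cons]; omega
        rw [if_neg c1, if_neg c2]
      · have hnone : am[n]? = none := by simp; omega
        rw [hnone]
        simp
    · obtain ⟨a, b, c, d, e, hr⟩ := hinv r (List.mem_of_getElem? ham)
      subst hr
      have hstep : (PySem.List.enumerate row (0 : Int)).foldl (pvStepA matrix (s : Int)) am =
          am.set s (pvAdd5 [a, b, c, d, e] (pvRowT matrix (s : Int) 0 row)) := by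
        rw [hz]
        exact pv_innerA matrix s row 0 am a b c d e ham
      rw [hstep, hcast]
      rw [ih (s + 1) _ (pv_inv_set am s _ ⟨_, _, _, _, _, by rw [pvAdd5_cons]⟩ hinv) n]
      by_cases hn : n = s
      · subst hn
        have c1 : ¬ (n + 1 ≤ n ∧ n - (n + 1) < rest.length) := by omega
        rw [if_neg c1, pv_getElem?_set_self am n _ ham,
          if_pos (by simp : n ≤ n ∧ n - n < (row :: rest).length)]
        simp [ham]
      · rw [List.getElem?_set_ne (fun hh => hn hh.symm)]
        by_cases hs : s + 1 ≤ n ∧ n - (s + 1) < rest.length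
        · rw [if_pos hs, if_pos (by simp only [List.length_cons]; omega : s ≤ n ∧ n - s < (row :: rest).length)]
          have : (row :: rest).getD (n - s) [] = rest.getD (n - (s + 1)) [] := by
            have h1 : n - s = (n - (s + 1)) + 1 := by omega
            rw [h1, List.getD_cons_succ]
          rw [this]
        · rw [if_neg hs, if_neg (by simp only [List.length_cons]; omega : ¬ (s ≤ n ∧ n - s < (row :: rest).length))]

theorem pv_cnt_countP (l : List Int) (w : Int) :
    pvCnt l w = (l.countP (fun x => x = w) : Int) := by
  have := PySem.List.foldl_ite_add_one (fun x : Int => x = w) l (0 : Int)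
  simpa [pvCnt] using this

-- counting 1-entries of l splits into those at index ≠ i and the one at index i (if any)
theorem pv_countP_split (i : Nat) :
    ∀ (l : List Int) (s : Nat),
    l.countP (fun x => x = 1) =
      ((PySem.List.enumerate l (s : Int)).countP (fun kv => kv.2 = 1 ∧ kv.1 ≠ (i : Int))) +
      (if s ≤ i ∧ i - s < l.length ∧ l.getD (i - s) 0 = 1 then 1 else 0) := by
  intro l
  induction l with
  | nil => intro s; simp [PySem.List.enumerate_nil]
  | cons x xs ihl =>
    intro s
    rw [PySem.List.enumerate_cons, List.countP_cons, List.countP_cons]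
    have hcast : ((s : Int) + 1) = ((s + 1 : Nat) : Int) := by push_cast; ring
    rw [hcast, ihl (s + 1)]
    by_cases hsi : s = i
    · subst hsi
      have h1 : ¬ (s + 1 ≤ s ∧ s - (s + 1) < xs.length ∧ xs.getD (s - (s + 1)) 0 = 1) := by omega
      rw [if_neg h1]
      have h2 : (decide ((((s : Int), x).2 = 1) ∧ ((s : Int), x).1 ≠ (s : Int))) = false := by
        simp
      rw [h2]
      have h3 : (s ≤ s ∧ s - s < (x :: xs).length ∧ (x :: xs).getD (s - s) 0 = 1) ↔ x = 1 := by
        simp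
      by_cases hx : x = 1
      · rw [if_pos (h3.2 hx)]; simp [hx]
      · rw [if_neg (fun hh => hx (h3.1 hh))]; simp [hx]
    · have h2 : (decide ((((s : Int), x).2 = 1) ∧ ((s : Int), x).1 ≠ (i : Int))) =
          decide (x = 1) := by
        simp only [decide_eq_decide]
        constructor
        · exact fun hh => hh.1
        · intro hx
          exact ⟨hx, by exact_mod_cast fun hh => hsi (by exact_mod_cast hh)⟩
      rw [h2]
      have h4 : (s + 1 ≤ i ∧ i - (s + 1) < xs.length ∧ xs.getD (i - (s + 1)) 0 = 1) ↔
          (s ≤ i ∧ i - s < (x :: xs).length ∧ (x :: xs).getD (i - s) 0 = 1) := by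
        constructor
        · intro ⟨ha, hb, hc⟩
          refine ⟨by omega, by simp only [List.length_cons]; omega, ?_⟩
          have : i - s = (i - (s + 1)) + 1 := by omega
          rw [this, List.getD_cons_succ]; exact hc
        · intro ⟨ha, hb, hc⟩
          have hgt : s < i := by omega
          have heq : i - s = (i - (s + 1)) + 1 := by omega
          refine ⟨by omega, by simp only [List.length_cons] at hb; omega, ?_⟩
          rw [heq, List.getD_cons_succ] at hc; exact hc
      rw [if_congr h4 rfl rfl]
      by_cases hx : x = 1 <;> simp [hx] <;> omega

theorem pv_cntNe_eq (l : List Int) (i : Nat) :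
    pvCntNe l (i : Int) =
      pvCnt l 1 -
        (if (i : Int) < (l.length : Int) ∧ PySem.List.pyGetD l (i : Int) 0 = 1 then 1 else 0) := by
  have hfold := PySem.List.foldl_ite_add_one
    (fun kv : Int × Int => kv.2 = 1 ∧ kv.1 ≠ (i : Int)) (PySem.List.enumerate l 0) (0 : Int)
  have hz : (0 : Int) = ((0 : Nat) : Int) := by norm_num
  have hsplit := pv_countP_split i l 0
  have hcond : ((i : Int) < (l.length : Int) ∧ PySem.List.pyGetD l (i : Int) 0 = 1) ↔
      (0 ≤ i ∧ i - 0 < l.length ∧ l.getD (i - 0) 0 = 1) := by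
    rw [PySem.List.pyGetD_natCast]
    constructor
    · intro ⟨h1, h2⟩; exact ⟨Nat.zero_le i, by omega, by simpa using h2⟩
    · intro ⟨_, h1, h2⟩; exact ⟨by omega, by simpa using h2⟩
  rw [pvCntNe, hfold, pv_cnt_countP, if_congr hcond rfl rfl]
  rw [hz] at hsplit ⊢
  rw [hsplit]
  push_cast
  by_cases hc : 0 ≤ i ∧ i - 0 < l.length ∧ l.getD (i - 0) 0 = 1 <;> simp [hc]

-- looking up the precomputed per-row count equals counting in the (defaulted) row
theorem pv_getD_map_cnt (matrix : List (List Int)) (w : Int) (s : Nat) :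
    (matrix.map (fun row => pvCnt row w)).getD s 0 = pvCnt (matrix.getD s []) w := by
  by_cases h : s < matrix.length
  · rw [List.getD_eq_getElem?_getD, List.getElem?_map, List.getD_eq_getElem?_getD,
      List.getElem?_eq_getElem h]
    simp
  · rw [List.getD_eq_getElem?_getD, List.getD_eq_getElem?_getD]
    rw [List.getElem?_eq_none (by simpa using h), List.getElem?_eq_none (by omega)]
    simp [pvCnt]

theorem pv_innerB (matrix : List (List Int)) (i : Nat) :
    ∀ (row : List Int) (s : Nat) (t : Int × Int × Int × Int × Int),
    (PySem.List.enumerate row (s : Int)).foldl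
        (pvStepB matrix (matrix.map (fun row => pvCnt row 1))
          (matrix.map (fun row => pvCnt row (-1))) i) t =
      (t.1 + (pvRowT matrix (i : Int) s row).1,
       t.2.1 + (pvRowT matrix (i : Int) s row).2.1,
       t.2.2.1 + (pvRowT matrix (i : Int) s row).2.2.1,
       t.2.2.2.1 + (pvRowT matrix (i : Int) s row).2.2.2.1,
       t.2.2.2.2 + (pvRowT matrix (i : Int) s row).2.2.2.2) := by
  intro row
  induction row with
  | nil => intro s t; simp [PySem.List.enumerate_nil, pvRowT]
  | cons v rest ihr =>
    intro s t
    rw [PySem.List.enumerate_cons]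
    simp only [List.foldl_cons]
    have hcast : ((s : Int) + 1) = ((s + 1 : Nat) : Int) := by push_cast; ring
    have hpos : PySem.List.pyGetD (matrix.map (fun row => pvCnt row 1)) (s : Int) 0 =
        pvCnt (PySem.List.pyGetD matrix (s : Int) []) 1 := by
      rw [PySem.List.pyGetD_natCast, PySem.List.pyGetD_natCast, pv_getD_map_cnt]
    have hneg : PySem.List.pyGetD (matrix.map (fun row => pvCnt row (-1))) (s : Int) 0 =
        pvCnt (PySem.List.pyGetD matrix (s : Int) []) (-1) := by
      rw [PySem.List.pyGetD_natCast, PySem.List.pyGetD_natCast, pv_getD_map_cnt]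
    by_cases h1 : v = 1
    · subst h1
      have e1 : pvStepB matrix (matrix.map (fun row => pvCnt row 1))
          (matrix.map (fun row => pvCnt row (-1))) i t ((s : Int), 1) =
          (t.1 + 1, t.2.1, t.2.2.1 + pvCnt (PySem.List.pyGetD matrix (s : Int) []) 1,
            t.2.2.2.1, t.2.2.2.2) := by
        rw [pvStepB]
        norm_num [hpos]
      rw [e1, hcast, ihr (s + 1) _]
      rw [pvRowT]
      norm_num
      and_intros <;> ring
    · by_cases h2 : v = -1
      · subst h2
        have e1 : pvStepB matrix (matrix.map (fun row => pvCnt row 1))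
            (matrix.map (fun row => pvCnt row (-1))) i t ((s : Int), -1) =
            (t.1, t.2.1 + 1, t.2.2.1,
              t.2.2.2.1 + pvCnt (PySem.List.pyGetD matrix (s : Int) []) (-1),
              t.2.2.2.2 + pvCntNe (PySem.List.pyGetD matrix (s : Int) []) (i : Int)) := by
          rw [pvStepB]
          norm_num [hpos, hneg, pv_cntNe_eq]
          ring
        rw [e1, hcast, ihr (s + 1) _]
        rw [pvRowT]
        norm_num
        and_intros <;> ring
      · have e1 : pvStepB matrix (matrix.map (fun row => pvCnt row 1))
            (matrix.map (fun row => pvCnt row (-1))) i t ((s : Int), v) = t := by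
          rw [pvStepB]; simp [h1, h2]
        rw [e1, hcast, ihr (s + 1) _]
        rw [pvRowT]
        simp only [h1, h2, if_false]

theorem analyze_graph_ports_eq (matrix : List (List Int)) (nodes : List Int) :
    analyze_graph matrix nodes = analyze_graph_alt matrix nodes := by
  have h5 : ((List.range 5).map (fun _ => (0 : Int))) = [0, 0, 0, 0, 0] := by
    simp [List.range_succ]
  apply List.ext_getElem?
  intro n
  -- left side: the characterization of A's fold
  have hL : (analyze_graph matrix nodes)[n]? =
      if 0 ≤ n ∧ n - 0 < matrix.length then
        ((nodes.map (fun _ => (List.range 5).map (fun _ => (0 : Int))))[n]?).map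
          (fun r => pvAdd5 r (pvRowT matrix (n : Int) 0 (matrix.getD (n - 0) [])))
      else (nodes.map (fun _ => (List.range 5).map (fun _ => (0 : Int))))[n]? := by
    rw [analyze_graph]
    exact pv_outerA matrix matrix 0 _
      (by intro r hr
          obtain ⟨_, _, hr'⟩ := List.mem_map.1 hr
          exact ⟨0, 0, 0, 0, 0, by rw [← hr', h5]⟩) n
  rw [hL]
  simp only [Nat.zero_le, Nat.sub_zero, true_and, h5, List.getElem?_map]
  rw [analyze_graph_alt]
  simp only [List.getElem?_map]
  by_cases hn : n < nodes.length
  · have hsome : nodes[n]? = some nodes[n] := List.getElem?_eq_getElem hn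
    have hrange : (List.range nodes.length)[n]? = some n := by
      rw [List.getElem?_eq_getElem (by simpa using hn)]
      simp
    rw [hsome, hrange]
    simp only [Option.map_some]
    by_cases hm : n < matrix.length
    · rw [if_pos hm, if_pos hm]
      have hB := pv_innerB matrix n (matrix.getD n []) 0 (0, 0, 0, 0, 0)
      simp only [Nat.cast_zero] at hB
      rw [show (matrix.map (fun row => List.foldl (fun a v => if v = 1 then a + 1 else a) 0 row)) =
            matrix.map (fun row => pvCnt row 1) from rfl,
          show (matrix.map (fun row => List.foldl (fun a v => if v = -1 then a + 1 else a) 0 row)) =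
            matrix.map (fun row => pvCnt row (-1)) from rfl]
      rw [hB, pvAdd5_cons]
    · rw [if_neg hm, if_neg hm]
  · have hnone : nodes[n]? = none := List.getElem?_eq_none (by omega)
    have hrnone : (List.range nodes.length)[n]? = none := by
      apply List.getElem?_eq_none
      simpa using hn
    rw [hnone, hrnone]
    simp

-- ===== VERDICT (by name: the statement is the Claim_ definition above) =====
theorem analyze_graph_spec : Claim_equal_analyze_graph := by
  intro matrix nodes _ _
  unfold Spec_analyze_graph
  exact analyze_graph_ports_eq matrix nodes
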